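-- pv_equiv track=rewrite | github.com/zgongc/SuperBot | components/tools/translate_scanner.py | _group_docstring_lines
-- ===== SOURCE A (Python) =====
-- from typing import List, Tuple, Dict, Optional
--
-- def _group_docstring_lines(findings: List[Tuple[int, str, str]]) -> List[List[Tuple[int, str, str]]]:
--     """
--     Group consecutive docstring lines together.
--
--     Args:
--         findings: List of (line_number, content_type, text)
--
--     Returns:
--         List of groups, where each group is a list of consecutive docstring findings
--     """
--     if not findings:
--         return []
--
--     groups = []
--     current_group = []
--     last_line_num = None
--
--     for finding in findings:
--         line_num, content_type, text = finding
--
--         # Check if this is a docstring and consecutive to the last line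
--         if content_type == 'docstring':
--             if current_group and last_line_num is not None and line_num == last_line_num + 1:
--                 # Add to current docstring group
--                 current_group.append(finding)
--             else:
--                 # Start new group
--                 if current_group:
--                     groups.append(current_group)
--                 current_group = [finding]
--             last_line_num = line_num
--         else:
--             # Not a docstring - close current group and add as single item
--             if current_group:
--                 groups.append(current_group)
--                 current_group = []
--             groups.append([finding])
--             last_line_num = None
--
--     # Don't forget the last group
--     if current_group:
--         groups.append(current_group)
--
--     return groups
-- ===== SOURCE B (Python) =====
-- from typing import List, Tuple
--
-- def _group_docstring_lines(findings: List[Tuple[int, str, str]]) -> List[List[Tuple[int, str, str]]]: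
--     # Pass 1: assign each finding a group id. Consecutive docstrings share an id;
--     # every non-docstring gets its own fresh id (and breaks consecutiveness).
--     ids = []
--     n = 0
--     prev = None
--     for line_num, content_type, _text in findings:
--         if content_type == 'docstring' and prev is not None and line_num == prev + 1:
--             ids.append(n - 1)
--         else:
--             ids.append(n)
--             n += 1
--         prev = line_num if content_type == 'docstring' else None
--     # Pass 2: distribute findings into n buckets by id.
--     groups = [[] for _ in range(n)]
--     for finding, i in zip(findings, ids):
--         groups[i].append(finding)
--     return groups
-- ===== Notes on version B (the rewrite author's own statement) =====
-- stated objective: alternative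
-- what changed: Replaced the single accumulator loop (growing current_group and flushing into groups) by two passes: one pass assigns each finding an integer group id (shared by consecutive docstrings, fresh for everything else), a second pass distributes the findings into pre-allocated buckets by id.
import Mathlib
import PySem

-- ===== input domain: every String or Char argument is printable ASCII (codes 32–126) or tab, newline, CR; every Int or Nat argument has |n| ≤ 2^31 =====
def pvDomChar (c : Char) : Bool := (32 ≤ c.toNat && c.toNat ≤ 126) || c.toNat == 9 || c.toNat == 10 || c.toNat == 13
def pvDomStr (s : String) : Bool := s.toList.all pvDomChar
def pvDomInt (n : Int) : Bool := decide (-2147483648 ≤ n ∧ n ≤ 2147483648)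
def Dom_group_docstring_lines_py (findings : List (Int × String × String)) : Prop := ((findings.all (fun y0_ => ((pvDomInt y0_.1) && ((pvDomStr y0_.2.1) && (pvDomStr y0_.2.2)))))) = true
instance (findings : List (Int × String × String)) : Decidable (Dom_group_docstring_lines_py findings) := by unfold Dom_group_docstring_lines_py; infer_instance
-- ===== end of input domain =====

-- B replaces A's single accumulator loop by a two-pass scheme (assign group ids, then
-- distribute into buckets); same O(n) cost, alternative decomposition.


-- ===== PORT A =====
-- loop body of A: state = (groups, current_group, last_line_num)
def pvStepA (s : List (List (Int × String × String)) × List (Int × String × String) × Option Int)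
    (finding : Int × String × String) :
    List (List (Int × String × String)) × List (Int × String × String) × Option Int :=
  let (groups, current_group, last_line_num) := s
  let (line_num, content_type, _) := finding
  if content_type = "docstring" then
    if current_group ≠ [] ∧ (match last_line_num with | some p => line_num == p + 1 | none => false) = true then
      -- add to current docstring group
      (groups, current_group ++ [finding], some line_num)
    else
      -- start new group (flushing current_group if non-empty)
      ((if current_group ≠ [] then groups ++ [current_group] else groups), [finding], some line_num)
  else
    -- not a docstring: close current group, add as single item
    ((if current_group ≠ [] then groups ++ [current_group] else groups) ++ [[finding]], [], none)

def group_docstring_lines_py (findings : List (Int × String × String)) :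
    List (List (Int × String × String)) :=
  if findings = [] then []
  else
    let r := findings.foldl pvStepA ([], [], none)
    if r.2.1 ≠ [] then r.1 ++ [r.2.1] else r.1

-- ===== PORT B =====
-- pass 1 loop body of B: state = (ids, n, prev)
def pvStepIds (s : List Nat × Nat × Option Int) (f : Int × String × String) :
    List Nat × Nat × Option Int :=
  let (ids, n, prev) := s
  let (line_num, content_type, _) := f
  let (ids2, n2) :=
    if content_type = "docstring" ∧ (match prev with | some p => line_num == p + 1 | none => false) = true then
      (ids ++ [n - 1], n)
    else
      (ids ++ [n], n + 1)
  (ids2, n2, if content_type = "docstring" then some line_num else none)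

-- pass 2 of B: `for finding, i in zip(findings, ids): groups[i].append(finding)`
def pvDistribute (pairs : List ((Int × String × String) × Nat))
    (groups : List (List (Int × String × String))) : List (List (Int × String × String)) :=
  pairs.foldl (fun gs fi => gs.modify fi.2 (· ++ [fi.1])) groups

def group_docstring_lines_py_alt (findings : List (Int × String × String)) :
    List (List (Int × String × String)) :=
  let r := findings.foldl pvStepIds ([], 0, none)
  let groups := (List.range r.2.1).map (fun _ => ([] : List (Int × String × String)))
  pvDistribute (findings.zip r.1) groups

-- ===== PRECONDITION & SPEC =====
def Spec_group_docstring_lines_py (findings : List (Int × String × String)) (out : List (List (Int × String × String))) : Prop := out = group_docstring_lines_py_alt findings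
instance (findings : List (Int × String × String)) (out : List (List (Int × String × String))) : Decidable (Spec_group_docstring_lines_py findings out) := by unfold Spec_group_docstring_lines_py; infer_instance

-- ===== CLAIM (what is proved, stated in full; the proofs are below) =====
def Claim_equal_group_docstring_lines_py : Prop := ∀ (findings : List (Int × String × String)), Dom_group_docstring_lines_py findings → Spec_group_docstring_lines_py findings (group_docstring_lines_py findings)

-- ===== LEMMAS AND PROOFS =====

-- proof-only helpers: pure recursive versions of B's first pass
abbrev pvMerge (f : Int × String × String) (prev : Option Int) : Prop :=
  f.2.1 = "docstring" ∧ (match prev with | some p => f.1 == p + 1 | none => false) = true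

def pvNext (f : Int × String × String) : Option Int :=
  if f.2.1 = "docstring" then some f.1 else none

def pvIds : List (Int × String × String) → Nat → Option Int → List Nat
  | [], _, _ => []
  | f :: fs, n, prev =>
    if pvMerge f prev then (n - 1) :: pvIds fs n (pvNext f)
    else n :: pvIds fs (n + 1) (pvNext f)

def pvCnt : List (Int × String × String) → Option Int → Nat
  | [], _ => 0
  | f :: fs, prev => (if pvMerge f prev then 0 else 1) + pvCnt fs (pvNext f)

-- B's first pass computes pvIds / pvCnt
theorem pvIds_fold (fs : List (Int × String × String)) :
    ∀ (acc : List Nat) (n : Nat) (prev : Option Int),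
    (fs.foldl pvStepIds (acc, n, prev)).1 = acc ++ pvIds fs n prev ∧
    (fs.foldl pvStepIds (acc, n, prev)).2.1 = n + pvCnt fs prev := by
  induction fs with
  | nil => intro acc n prev; simp [pvIds, pvCnt]
  | cons f fs ih =>
    intro acc n prev
    obtain ⟨line, ct, tx⟩ := f
    have hstep : pvStepIds (acc, n, prev) (line, ct, tx) =
        ((if pvMerge (line, ct, tx) prev then acc ++ [n - 1] else acc ++ [n]),
         (if pvMerge (line, ct, tx) prev then n else n + 1),
         pvNext (line, ct, tx)) := by
      simp only [pvStepIds, pvMerge, pvNext]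
      split_ifs <;> simp_all
    rw [List.foldl_cons, hstep]
    by_cases hm : pvMerge (line, ct, tx) prev
    · simp only [if_pos hm, pvIds, pvCnt]
      rcases ih (acc ++ [n - 1]) n (pvNext (line, ct, tx)) with ⟨h1, h2⟩
      exact ⟨by rw [h1]; simp, by rw [h2]; omega⟩
    · simp only [if_neg hm, pvIds, pvCnt]
      rcases ih (acc ++ [n]) (n + 1) (pvNext (line, ct, tx)) with ⟨h1, h2⟩
      exact ⟨by rw [h1]; simp, by rw [h2]; omega⟩

-- finish step of A
def pvFinish (r : List (List (Int × String × String)) × List (Int × String × String) × Option Int) :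
    List (List (Int × String × String)) :=
  if r.2.1 ≠ [] then r.1 ++ [r.2.1] else r.1

theorem pvModify_at (l1 l2 : List (List (Int × String × String))) (x : List (Int × String × String))
    (g : List (Int × String × String) → List (Int × String × String)) :
    (l1 ++ x :: l2).modify l1.length g = l1 ++ g x :: l2 := by
  simp [List.modify_eq_set_getElem?]

theorem pvMain (fs : List (Int × String × String)) :
    ∀ (groupsA : List (List (Int × String × String))) (cur : List (Int × String × String))
      (prev : Option Int), (cur = [] ↔ prev = none) →
    pvFinish (fs.foldl pvStepA (groupsA, cur, prev))
      = pvDistribute (fs.zip (pvIds fs (groupsA.length + (if cur = [] then 0 else 1)) prev))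
          ((groupsA ++ (if cur = [] then [] else [cur])) ++ List.replicate (pvCnt fs prev) []) := by
  induction fs with
  | nil =>
    intro groupsA cur prev hinv
    by_cases hc : cur = [] <;> simp [pvFinish, pvDistribute, pvIds, pvCnt, hc]
  | cons f fs ih =>
    intro groupsA cur prev hinv
    obtain ⟨line, ct, tx⟩ := f
    rw [List.foldl_cons]
    by_cases hd : ct = "docstring"
    · by_cases hm : pvMerge (line, ct, tx) prev
      · -- consecutive docstring: merge into current group
        obtain ⟨p, hp⟩ : ∃ p, prev = some p := by
          cases prev with
          | none => exact absurd hm.2 (by simp)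
          | some p => exact ⟨p, rfl⟩
        have hcur : cur ≠ [] := fun h => by simp [hinv.mp h] at hp
        have hA : pvStepA (groupsA, cur, prev) (line, ct, tx)
            = (groupsA, cur ++ [(line, ct, tx)], some line) := by
          simp only [pvStepA]
          rw [if_pos hd, if_pos ⟨hcur, hm.2⟩]
        rw [hA, ih groupsA (cur ++ [(line, ct, tx)]) (some line) (by simp)]
        have hnext : pvNext (line, ct, tx) = some line := by simp [pvNext, hd]
        simp only [pvIds, pvCnt, if_pos hm, hnext, if_neg hcur, List.zip_cons_cons,
          if_neg (by simp : ¬ (cur ++ [(line, ct, tx)] = [])), pvDistribute, List.foldl_cons]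
        rw [show (groupsA ++ [cur]) ++ List.replicate (0 + pvCnt fs (some line)) []
              = groupsA ++ cur :: List.replicate (pvCnt fs (some line)) [] by simp,
            show groupsA.length + 1 - 1 = groupsA.length by omega,
            pvModify_at]
        simp
      · -- docstring starting a new group
        have hA : pvStepA (groupsA, cur, prev) (line, ct, tx)
            = ((if cur ≠ [] then groupsA ++ [cur] else groupsA), [(line, ct, tx)], some line) := by
          simp only [pvStepA]
          rw [if_pos hd, if_neg (fun h => hm ⟨hd, h.2⟩)]
        rw [hA, ih _ [(line, ct, tx)] (some line) (by simp)]
        have hnext : pvNext (line, ct, tx) = some line := by simp [pvNext, hd]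
        have hlen : (if cur ≠ [] then groupsA ++ [cur] else groupsA).length
            = groupsA.length + (if cur = [] then 0 else 1) := by
          by_cases hc : cur = [] <;> simp [hc]
        have hgs : groupsA ++ (if cur = [] then [] else [cur])
            = (if cur ≠ [] then groupsA ++ [cur] else groupsA) := by
          by_cases hc : cur = [] <;> simp [hc]
        simp only [pvIds, pvCnt, if_neg hm, hnext, List.zip_cons_cons, pvDistribute,
          List.foldl_cons, ← hlen, hgs]
        rw [show List.replicate (1 + pvCnt fs (some line)) ([] : List (Int × String × String))
              = [] :: List.replicate (pvCnt fs (some line)) [] by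
            rw [Nat.add_comm]; rfl,
            pvModify_at]
        simp
      -- non-docstring: close current group, singleton group
    · have hm : ¬ pvMerge (line, ct, tx) prev := fun h => hd h.1
      have hA : pvStepA (groupsA, cur, prev) (line, ct, tx)
          = ((if cur ≠ [] then groupsA ++ [cur] else groupsA) ++ [[(line, ct, tx)]], [], none) := by
        simp only [pvStepA]
        rw [if_neg hd]
      rw [hA, ih _ [] none (by simp)]
      have hnext : pvNext (line, ct, tx) = none := by simp [pvNext, hd]
      have hlen : (if cur ≠ [] then groupsA ++ [cur] else groupsA).length
          = groupsA.length + (if cur = [] then 0 else 1) := by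
        by_cases hc : cur = [] <;> simp [hc]
      have hgs : groupsA ++ (if cur = [] then [] else [cur])
          = (if cur ≠ [] then groupsA ++ [cur] else groupsA) := by
        by_cases hc : cur = [] <;> simp [hc]
      simp only [pvIds, pvCnt, if_neg hm, hnext, List.zip_cons_cons, pvDistribute,
        List.foldl_cons, ← hlen, hgs]
      rw [show List.replicate (1 + pvCnt fs none) ([] : List (Int × String × String))
            = [] :: List.replicate (pvCnt fs none) [] by rw [Nat.add_comm]; rfl,
          pvModify_at]
      simp

-- ===== VERDICT (by name: the statement is the Claim_ definition above) =====
theorem group_docstring_lines_py_spec : Claim_equal_group_docstring_lines_py := by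
  intro findings _
  unfold Spec_group_docstring_lines_py group_docstring_lines_py group_docstring_lines_py_alt
  rcases hW : findings.foldl pvStepIds ([], 0, none) with ⟨ids, n, pr⟩
  have h1 := (pvIds_fold findings [] 0 none).1
  have h2 := (pvIds_fold findings [] 0 none).2
  rw [hW] at h1 h2
  simp only at h1 h2
  subst h1
  have hmain := pvMain findings [] [] none (by simp)
  by_cases h0 : findings = []
  · subst h0
    simp only [pvCnt] at h2
    subst h2
    simp [pvDistribute]
  · rw [if_neg h0]
    simp only [pvFinish] at hmain
    rw [hmain]
    congr 1
    simp only [h2, Nat.zero_add]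
    simp
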